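-- pv_equiv track=rewrite | github.com/HateBin/SoftwareQualityRating | test3_V2.2.py | calculate_bug_reopen_rating
-- ===== SOURCE A (Python) =====
-- def calculate_bug_reopen_rating(X: int) -> int:
--     """
--     根据缺陷重新打开次数计算软件质量评分
--
--     评分规则（左闭右闭区间）:
--         0次  → 20分（质量优秀）
--         1次  → 15分（质量良好）
--         2次  → 10分（质量合格）
--         3次  → 5分（质量堪忧）
--         4次及以上 → 1分（质量差）
--
--     参数:
--         X (int): 缺陷重新打开次数，应为非负整数。
--                   当输入值非整数时会触发隐式类型转换
--
--     返回:
--         int: 对应评分值（20/15/10/5/1分），输入不符合规范时返回None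
--
--     异常处理:
--         - 输入负数值时触发AssertionError
--         - 输入非数值类型将触发TypeError
--         - 所有未定义情况返回None并打印警告
--     """
--     # 防御性处理：将输入强制转换为整数（处理浮点数输入情况）
--     try:
--         X: int = int(X)
--     except (ValueError, TypeError):
--         raise TypeError("错误：输入值必须为可转换为整数的类型")
--
--     # 处理负值输入（根据业务逻辑视为最差情况）
--     try:
--         assert X >= 0
--     except AssertionError:
--         raise ValueError("错误：缺陷重新打开次数不应为负数")
--
--     # 定义评分映射字典（key为最大次数阈值，value为对应得分）
--     score_mapping: dict[int, int] = {
--         0: 20,  # 0次重开得满分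
--         1: 15,  # 1次重开扣5分
--         2: 10,  # 2次重开扣10分
--         3: 5,  # 3次重开扣15分
--         4: 1  # 4次及以上扣19分
--     }
--
--     # 遍历评分阈值判断区间（按阈值降序排列）
--     for threshold in sorted(score_mapping.keys(), reverse=True):
--         if X >= threshold:
--             return score_mapping[threshold]
-- ===== SOURCE B (Python) =====
-- def calculate_bug_reopen_rating(X: int) -> int:
--     try:
--         X = int(X)
--     except (ValueError, TypeError):
--         raise TypeError("错误：输入值必须为可转换为整数的类型")
--     try:
--         assert X >= 0
--     except AssertionError:
--         raise ValueError("错误：缺陷重新打开次数不应为负数")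
--     return 1 if X >= 4 else 20 - 5 * X
-- ===== Notes on version B (the rewrite author's own statement) =====
-- stated objective: simpler
-- what changed: Replaces the dict construction plus reverse-sorted threshold scan with a direct closed-form arithmetic return (1 if X >= 4 else 20 - 5*X).
import Mathlib
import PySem

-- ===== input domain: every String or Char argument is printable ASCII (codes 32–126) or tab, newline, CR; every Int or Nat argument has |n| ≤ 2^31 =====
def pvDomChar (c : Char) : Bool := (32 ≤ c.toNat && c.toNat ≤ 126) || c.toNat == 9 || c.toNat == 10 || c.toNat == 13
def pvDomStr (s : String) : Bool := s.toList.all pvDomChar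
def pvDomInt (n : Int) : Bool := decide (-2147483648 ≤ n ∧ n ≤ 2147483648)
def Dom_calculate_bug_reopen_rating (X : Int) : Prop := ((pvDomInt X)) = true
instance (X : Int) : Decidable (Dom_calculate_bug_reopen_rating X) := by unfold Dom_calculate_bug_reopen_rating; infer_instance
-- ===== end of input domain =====

-- B replaces A's dict + reverse-sorted threshold scan with a closed-form arithmetic return (simpler).


-- ===== PORT A =====
-- int(X) on an int is the identity; the loop's first matching threshold returns its score
-- (the final implicit 'return None' is unreachable for X ≥ 0, modelled by .getD 0 outside Pre_).
def calculate_bug_reopen_rating (X : Int) : Int :=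
  let score_mapping : PySem.Dict Int Int :=
    PySem.Dict.ofList [(0, 20), (1, 15), (2, 10), (3, 5), (4, 1)]
  ((PySem.List.sorted score_mapping.keys (fun k => k) true).foldl
    (fun acc threshold =>
      match acc with
      | some v => some v
      | none => if X ≥ threshold then (score_mapping.get? threshold) else none)
    none).getD 0

-- ===== PORT B =====
def calculate_bug_reopen_rating_alt (X : Int) : Int :=
  if X ≥ 4 then 1 else 20 - 5 * X

-- ===== PRECONDITION & SPEC =====
-- Pre_ excludes X < 0, on which the Python A (and B) raise ValueError.
def Pre_calculate_bug_reopen_rating (X : Int) : Prop := 0 ≤ X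
instance (X : Int) : Decidable (Pre_calculate_bug_reopen_rating X) := by unfold Pre_calculate_bug_reopen_rating; infer_instance
def pvWitness_calculate_bug_reopen_rating : Int := 2
def Spec_calculate_bug_reopen_rating (X : Int) (out : Int) : Prop := out = calculate_bug_reopen_rating_alt X
instance (X : Int) (out : Int) : Decidable (Spec_calculate_bug_reopen_rating X out) := by unfold Spec_calculate_bug_reopen_rating; infer_instance

-- ===== CLAIM (what is proved, stated in full; the proofs are below) =====
def Claim_equal_calculate_bug_reopen_rating : Prop := ∀ (X : Int), Dom_calculate_bug_reopen_rating X → Pre_calculate_bug_reopen_rating X → Spec_calculate_bug_reopen_rating X (calculate_bug_reopen_rating X)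

-- ===== LEMMAS AND PROOFS =====

-- ===== VERDICT (by name: the statement is the Claim_ definition above) =====
theorem calculate_bug_reopen_rating_spec : Claim_equal_calculate_bug_reopen_rating := by
  intro X _ hpre
  unfold Spec_calculate_bug_reopen_rating calculate_bug_reopen_rating calculate_bug_reopen_rating_alt
  unfold Pre_calculate_bug_reopen_rating at hpre
  norm_num [PySem.Dict.ofList, PySem.Dict.keys, PySem.List.sorted, PySem.Dict.empty,
    PySem.Dict.update, PySem.Dict.items, PySem.Dict.insert, PySem.Dict.contains, List.find?, PySem.List.insertBy, PySem.Dict.get?, List.foldl]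
  norm_num [show ((0:Int) == 4) = false from rfl, show ((1:Int) == 4) = false from rfl,
    show ((2:Int) == 4) = false from rfl, show ((3:Int) == 4) = false from rfl,
    show ((0:Int) == 3) = false from rfl, show ((1:Int) == 3) = false from rfl,
    show ((2:Int) == 3) = false from rfl, show ((0:Int) == 2) = false from rfl,
    show ((1:Int) == 2) = false from rfl, show ((0:Int) == 1) = false from rfl]
  split_ifs <;> simp_all <;> omega
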